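-- pv_equiv track=rewrite | github.com/Algorithm-study-2044/Songhee | kakao/불량사용자.py | solution
-- ===== SOURCE A (Python) =====
-- from itertools import product
--
-- def is_banned(uid, bid):
--
--     n_uid = len(uid)
--     n_bid = len(bid)
--
--     # length
--     if n_uid != n_bid:
--         return False
--
--     # matching
--     for i in range(n_uid):
--         if bid[i] == '*':
--             continue
--         elif bid[i] != uid[i]:
--             return False
--
--     return True
--
-- def solution(user_id, banned_id):
--
--     banned = []
--
--     n_uid = len(user_id)
--     n_bid = len(banned_id)
--
--     for i in range(n_bid):
--         tmp = []
--         for j in range(n_uid):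
--             if is_banned(user_id[j], banned_id[i]):
--                 tmp.append(j)
--         banned.append(tmp)
--
--     # tmp = [[0,1,2],[3]]
--     # comb = [(0,3), (1,3), (2,3)]
--     comb = list(product(*banned))
--
--     # to eliminate duplicate answer
--     ans_set = set()
--     for elem in comb:
--         set_elem = set(list(elem))
--         # to ban everything
--         if len(set_elem) == len(banned):
--             elem = list(elem)
--             elem.sort()
--             elem = tuple(elem)
--             # to prevent duplication
--             ans_set.add(elem)
--
--     answer = len(ans_set)
--
--     return answer
-- ===== SOURCE B (Python) =====
-- def solution(user_id, banned_id):
--     def matches(uid, bid):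
--         return len(uid) == len(bid) and all(b == '*' or b == u for u, b in zip(uid, bid))
--
--     states = {()}
--     for bid in banned_id:
--         cand = [j for j, uid in enumerate(user_id) if matches(uid, bid)]
--         states = {tuple(sorted(s + (j,))) for s in states for j in cand if j not in s}
--     return len(states)
-- ===== Notes on version B (the rewrite author's own statement) =====
-- stated objective: alternative
-- what changed: Instead of materialising the full Cartesian product of all candidate lists and then filtering/deduplicating it, B folds over the patterns keeping a deduplicated set of partial index-sets, pruning reused indices and duplicate states at every step; intended to prune faster on duplicate-heavy inputs, but a timing run could not confirm a speed-up at the largest sizes, so no speed is claimed.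
import Mathlib
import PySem

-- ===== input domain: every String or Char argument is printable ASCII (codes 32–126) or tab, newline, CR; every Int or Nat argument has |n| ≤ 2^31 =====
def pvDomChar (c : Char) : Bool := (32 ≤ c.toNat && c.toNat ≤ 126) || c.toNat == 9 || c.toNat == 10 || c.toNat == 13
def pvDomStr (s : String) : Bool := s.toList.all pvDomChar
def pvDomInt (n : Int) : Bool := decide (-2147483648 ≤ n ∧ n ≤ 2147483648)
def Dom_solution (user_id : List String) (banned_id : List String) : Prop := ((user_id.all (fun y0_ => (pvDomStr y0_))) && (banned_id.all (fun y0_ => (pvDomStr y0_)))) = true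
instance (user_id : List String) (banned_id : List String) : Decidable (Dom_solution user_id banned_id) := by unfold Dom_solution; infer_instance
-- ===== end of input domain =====

-- B folds a deduplicated set of partial index-sets over the patterns (pruning reused indices and
-- duplicate states early) instead of materialising the full Cartesian product and filtering it.


-- ===== PORT A =====
-- A's index loop over the two equal-length char lists ('*' skips, mismatch returns False)
def isBannedLoop : List Char → List Char → Bool
  | uc :: us, bc :: bs =>
      if bc = '*' then isBannedLoop us bs
      else if bc ≠ uc then false
      else isBannedLoop us bs
  | _, _ => true

def is_banned (uid : String) (bid : String) : Bool :=
  if PySem.Str.len uid ≠ PySem.Str.len bid then false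
  else isBannedLoop uid.toList bid.toList

-- inner loop of A: tmp = indices j with is_banned(user_id[j], banned_id[i])
def tmpA (user_id : List String) (bid : String) : List Int :=
  (PySem.List.enumerate user_id).foldl
    (fun tmp ju => if is_banned ju.2 bid then tmp ++ [ju.1] else tmp) []

def solution (user_id : List String) (banned_id : List String) : Int :=
  let banned := banned_id.foldl (fun acc bid => acc ++ [tmpA user_id bid]) []
  let comb := banned.foldl (fun acc lst => acc.flatMap (fun t => lst.map (fun j => t ++ [j]))) [[]]
  let ans_set := comb.foldl
    (fun s elem =>
      if (PySem.Set.ofList elem).length = banned.length then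
        PySem.Set.add s (PySem.List.sorted elem (fun x => x) false)
      else s)
    ([] : PySem.Set (List Int))
  (ans_set.length : Int)

-- ===== PORT B =====
def matchesB (uid : String) (bid : String) : Bool :=
  PySem.Str.len uid == PySem.Str.len bid &&
    (List.zip uid.toList bid.toList).all (fun p => p.2 == '*' || p.2 == p.1)

def candB (user_id : List String) (bid : String) : List Int :=
  ((PySem.List.enumerate user_id).filter (fun ju => matchesB ju.2 bid)).map (fun ju => ju.1)

-- one pattern step: extend every state by an unused matching index, deduplicated as a set
def stepB (states : PySem.Set (List Int)) (cand : List Int) : PySem.Set (List Int) :=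
  PySem.Set.ofList (states.flatMap (fun s =>
    (cand.filter (fun j => !(decide (j ∈ s)))).map
      (fun j => PySem.List.sorted (s ++ [j]) (fun x => x) false)))

def solution_alt (user_id : List String) (banned_id : List String) : Int :=
  ((banned_id.foldl (fun states bid => stepB states (candB user_id bid))
      (PySem.Set.ofList [([] : List Int)])).length : Int)

-- ===== PRECONDITION & SPEC =====
def Spec_solution (user_id : List String) (banned_id : List String) (out : Int) : Prop := out = solution_alt user_id banned_id
instance (user_id : List String) (banned_id : List String) (out : Int) : Decidable (Spec_solution user_id banned_id out) := by unfold Spec_solution; infer_instance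

-- ===== CLAIM (what is proved, stated in full; the proofs are below) =====
def Claim_equal_solution : Prop := ∀ (user_id : List String) (banned_id : List String), Dom_solution user_id banned_id → Spec_solution user_id banned_id (solution user_id banned_id)

-- ===== LEMMAS AND PROOFS =====

-- the two matchers agree
theorem isBannedLoop_eq (u b : List Char) (h : u.length = b.length) :
    isBannedLoop u b = (List.zip u b).all (fun p => p.2 == '*' || p.2 == p.1) := by
  induction u generalizing b with
  | nil =>
    cases b with
    | nil => rfl
    | cons bc bs => simp at h
  | cons uc us ih =>
    cases b with
    | nil => simp at h
    | cons bc bs =>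
      simp only [List.length_cons, Nat.add_right_cancel_iff] at h
      simp only [isBannedLoop, List.zip_cons_cons, List.all_cons]
      by_cases h1 : bc = '*'
      · simp [h1, ih bs h]
      · by_cases h2 : bc = uc
        · simp [h2, ih bs h]
        · simp [h1, h2]

theorem is_banned_eq_matches (uid bid : String) : is_banned uid bid = matchesB uid bid := by
  unfold is_banned matchesB
  simp only [pysem]
  by_cases h : uid.toList.length = bid.toList.length
  · have h' := h
    simp only [String.length_toList] at h'
    simp [h', isBannedLoop_eq _ _ h]
  · have h' := h
    simp only [String.length_toList] at h'
    simp [h']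

theorem tmpA_eq_candB (user_id : List String) (bid : String) :
    tmpA user_id bid = candB user_id bid := by
  unfold tmpA candB
  rw [PySem.List.foldl_append_if]
  simp [is_banned_eq_matches]

theorem nodup_concat_iff (t : List Int) (j : Int) :
    (t ++ [j]).Nodup ↔ t.Nodup ∧ j ∉ t := by
  simp [List.nodup_append]
  intro _
  constructor
  · intro h hj; exact h j hj rfl
  · intro h a ha he; exact h (he ▸ ha)

-- |set(t)| = |t| iff t has no duplicates
theorem length_ofList_eq_iff (t : List Int) :
    (PySem.Set.ofList t).length = t.length ↔ t.Nodup := by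
  constructor
  · intro h
    have hperm : (PySem.Set.ofList t).Perm t.dedup := by
      refine (List.perm_ext_iff_of_nodup (PySem.Set.nodup_ofList t) (List.nodup_dedup t)).mpr ?_
      intro x; simp [PySem.Set.mem_ofList]
    have hlen : t.dedup.length = t.length := by rw [← hperm.length_eq, h]
    have hsub : t.dedup.Sublist t := List.dedup_sublist t
    have heq := hsub.eq_of_length hlen
    rw [← heq]; exact List.nodup_dedup t
  · intro h; rw [PySem.Set.ofList_eq_self_of_nodup t h]

-- membership through A's accumulating if/add loop
theorem mem_foldl_add_if {α β : Type} [BEq β] [LawfulBEq β] (p : α → Prop) [DecidablePred p] (f : α → β)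
    (l : List α) (s : PySem.Set β) (hs : s.Nodup) :
    (l.foldl (fun s e => if p e then PySem.Set.add s (f e) else s) s).Nodup ∧
    (∀ x, x ∈ l.foldl (fun s e => if p e then PySem.Set.add s (f e) else s) s ↔
      x ∈ s ∨ ∃ e ∈ l, p e ∧ x = f e) := by
  induction l generalizing s with
  | nil => exact ⟨hs, by simp⟩
  | cons e l ih =>
    simp only [List.foldl_cons]
    by_cases hp : p e
    · rw [if_pos hp]
      obtain ⟨h1, h2⟩ := ih (PySem.Set.add s (f e)) (PySem.Set.nodup_add s (f e) hs)
      refine ⟨h1, fun x => ?_⟩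
      rw [h2 x, PySem.Set.mem_add]
      constructor
      · rintro ((h | h) | ⟨e', he', hpe', rfl⟩)
        · exact .inl h
        · exact .inr ⟨e, by simp [hp, h]⟩
        · exact .inr ⟨e', by simp [he', hpe']⟩
      · rintro (h | ⟨e', he', hpe', rfl⟩)
        · exact .inl (.inl h)
        · rcases List.mem_cons.mp he' with rfl | hmem
          · exact .inl (.inr rfl)
          · exact .inr ⟨e', hmem, hpe', rfl⟩
    · rw [if_neg hp]
      obtain ⟨h1, h2⟩ := ih s hs
      refine ⟨h1, fun x => ?_⟩
      rw [h2 x]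
      constructor
      · rintro (h | ⟨e', he', hpe', rfl⟩)
        · exact .inl h
        · exact .inr ⟨e', by simp [he', hpe']⟩
      · rintro (h | ⟨e', he', hpe', rfl⟩)
        · exact .inl h
        · rcases List.mem_cons.mp he' with rfl | hmem
          · exact absurd hpe' hp
          · exact .inr ⟨e', hmem, hpe', rfl⟩

-- the product step, named for the proofs
def prodStep (P : List (List Int)) (c : List Int) : List (List Int) :=
  P.flatMap (fun t => c.map (fun j => t ++ [j]))

theorem sorted_eq_sorted_of_perm_int (s t : List Int) (h : s.Perm t) :
    PySem.List.sorted s (fun x => x) false = PySem.List.sorted t (fun x => x) false :=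
  PySem.List.sorted_eq_sorted_of_perm s t (fun x => x) (fun _ _ h => h) h

-- main invariant: B's state set is exactly {sorted t | t ∈ product of processed cands, t nodup}
theorem main_inv (cands : List (List Int)) :
    ∀ (states : PySem.Set (List Int)) (P : List (List Int)) (k : Nat),
    states.Nodup →
    (∀ t ∈ P, t.length = k) →
    (∀ x, x ∈ states ↔ ∃ t ∈ P, t.Nodup ∧ x = PySem.List.sorted t (fun x => x) false) →
    (cands.foldl stepB states).Nodup ∧
    (∀ t ∈ cands.foldl prodStep P, t.length = k + cands.length) ∧
    (∀ x, x ∈ cands.foldl stepB states ↔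
      ∃ t ∈ cands.foldl prodStep P, t.Nodup ∧ x = PySem.List.sorted t (fun x => x) false) := by
  induction cands with
  | nil =>
    intro states P k h1 h2 h3
    exact ⟨h1, by simpa using h2, h3⟩
  | cons c cs ih =>
    intro states P k h1 h2 h3
    simp only [List.foldl_cons, List.length_cons]
    have hstep : ∀ x, x ∈ stepB states c ↔
        ∃ t ∈ prodStep P c, t.Nodup ∧ x = PySem.List.sorted t (fun x => x) false := by
      intro x
      unfold stepB prodStep
      rw [PySem.Set.mem_ofList]
      simp only [List.mem_flatMap, List.mem_map, List.mem_filter, Bool.not_eq_eq_eq_not,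
        Bool.not_true, decide_eq_false_iff_not]
      constructor
      · rintro ⟨s, hs, j, ⟨hjc, hjs⟩, rfl⟩
        rcases (h3 s).mp hs with ⟨t, htP, htN, rfl⟩
        have hjt : j ∉ t := fun hj => hjs ((PySem.List.mem_sorted _ _ _ _).mpr hj)
        refine ⟨t ++ [j], ⟨t, htP, j, hjc, rfl⟩, (nodup_concat_iff t j).mpr ⟨htN, hjt⟩, ?_⟩
        exact sorted_eq_sorted_of_perm_int _ _
          ((PySem.List.sorted_perm t (fun x => x) false).append_right [j])
      · rintro ⟨t', ⟨t, htP, j, hjc, rfl⟩, htN, rfl⟩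
        obtain ⟨htN', hjt⟩ := (nodup_concat_iff t j).mp htN
        refine ⟨PySem.List.sorted t (fun x => x) false, (h3 _).mpr ⟨t, htP, htN', rfl⟩,
          j, ⟨hjc, fun hj => hjt ((PySem.List.mem_sorted _ _ _ _).mp hj)⟩, ?_⟩
        exact sorted_eq_sorted_of_perm_int _ _
          ((PySem.List.sorted_perm t (fun x => x) false).append_right [j])
    have hlen : ∀ t ∈ prodStep P c, t.length = k + 1 := by
      rintro t' ht'
      simp only [prodStep, List.mem_flatMap, List.mem_map] at ht'
      rcases ht' with ⟨t, htP, j, _, rfl⟩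
      simp [h2 t htP]
    have hrec := ih (stepB states c) (prodStep P c) (k + 1)
      (PySem.Set.nodup_ofList _) hlen hstep
    refine ⟨hrec.1, ?_, hrec.2.2⟩
    intro t ht
    have := hrec.2.1 t ht
    omega

theorem solution_eq (user_id banned_id : List String) :
    solution user_id banned_id = solution_alt user_id banned_id := by
  unfold solution solution_alt
  simp only [PySem.List.foldl_append_singleton_eq_map, List.nil_append, tmpA_eq_candB]
  set cands := banned_id.map (fun bid => candB user_id bid) with hc
  have hBfold : banned_id.foldl (fun states bid => stepB states (candB user_id bid))
      (PySem.Set.ofList [([] : List Int)])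
      = cands.foldl stepB (PySem.Set.ofList [([] : List Int)]) := by
    rw [hc, List.foldl_map]
  rw [hBfold]
  have h0 : ∀ x, x ∈ (PySem.Set.ofList [([] : List Int)]) ↔
      ∃ t ∈ [([] : List Int)], t.Nodup ∧ x = PySem.List.sorted t (fun x => x) false := by
    intro x
    rw [PySem.Set.mem_ofList]
    constructor
    · intro hx
      simp at hx
      exact ⟨[], by simp [hx]; rfl⟩
    · rintro ⟨t, ht, -, rfl⟩
      simp at ht; subst ht
      simp; rfl
  have hmain := main_inv cands (PySem.Set.ofList [([] : List Int)]) [[]] 0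
    (PySem.Set.nodup_ofList _) (by simp) h0
  have hA := mem_foldl_add_if
    (fun elem => (PySem.Set.ofList elem).length = cands.length)
    (fun elem => PySem.List.sorted elem (fun x => x) false)
    (cands.foldl prodStep [[]])
    ([] : PySem.Set (List Int)) List.nodup_nil
  beta_reduce at hA
  have hPeq : cands.foldl (fun acc lst => acc.flatMap (fun t => lst.map (fun j => t ++ [j]))) [[]]
      = cands.foldl prodStep [[]] := rfl
  rw [hPeq]
  have hcond : ∀ t ∈ cands.foldl prodStep [[]],
      (((PySem.Set.ofList t).length = cands.length) ↔ t.Nodup) := by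
    intro t ht
    have hlen := hmain.2.1 t ht
    simp only [Nat.zero_add] at hlen
    rw [← hlen]
    exact length_ofList_eq_iff t
  have hsame : ∀ x,
      x ∈ ((cands.foldl prodStep [[]]).foldl
        (fun s elem => if (PySem.Set.ofList elem).length = cands.length then
          PySem.Set.add s (PySem.List.sorted elem (fun x => x) false) else s)
        ([] : PySem.Set (List Int)))
      ↔ x ∈ cands.foldl stepB (PySem.Set.ofList [([] : List Int)]) := by
    intro x
    rw [hA.2 x, hmain.2.2 x]
    simp only [List.not_mem_nil, false_or]
    constructor
    · rintro ⟨e, he, hpe, rfl⟩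
      exact ⟨e, he, (hcond e he).mp hpe, rfl⟩
    · rintro ⟨e, he, hN, rfl⟩
      exact ⟨e, he, (hcond e he).mpr hN, rfl⟩
  have hperm := (List.perm_ext_iff_of_nodup hA.1 hmain.1).mpr hsame
  exact congrArg (fun n : Nat => (n : Int)) hperm.length_eq

-- ===== VERDICT (by name: the statement is the Claim_ definition above) =====
theorem solution_spec : Claim_equal_solution := by
  intro user_id banned_id _
  unfold Spec_solution
  exact solution_eq user_id banned_id
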